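-- pv_equiv track=rewrite | github.com/xyrlsz/Ayumu_Bot | Plugins/Bili/BiliInfo.py | get_av_id_in_text
-- ===== SOURCE A (Python) =====
-- def get_av_id_in_text(input_string):
--     # 找到"av"在字符串中的位置
--     start_index = input_string.find("av")
--
--     # 如果找到了"av"
--     if start_index != -1:
--         # 从"av"的位置开始遍历字符串，直到遇到不是数字的字符为止
--         av_id = "av"
--         for char in input_string[start_index + len("av") :]:
--             if char.isdigit():
--                 av_id += char
--             else:
--                 break
--         return av_id
--     else:
--         return None
-- ===== SOURCE B (Python) =====
-- def get_av_id_in_text(input_string):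
--     for i in range(len(input_string)):
--         if input_string.startswith('av', i):
--             end = i + 2
--             while end < len(input_string) and input_string[end].isdigit():
--                 end += 1
--             return input_string[i:end]
--     return None
-- ===== Notes on version B (the rewrite author's own statement) =====
-- stated objective: alternative
-- what changed: Replaces str.find plus a character-accumulating loop with a single positional scan that locates the leftmost 'av', extends an end index over the digits, and returns one slice of the input.
import Mathlib
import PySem

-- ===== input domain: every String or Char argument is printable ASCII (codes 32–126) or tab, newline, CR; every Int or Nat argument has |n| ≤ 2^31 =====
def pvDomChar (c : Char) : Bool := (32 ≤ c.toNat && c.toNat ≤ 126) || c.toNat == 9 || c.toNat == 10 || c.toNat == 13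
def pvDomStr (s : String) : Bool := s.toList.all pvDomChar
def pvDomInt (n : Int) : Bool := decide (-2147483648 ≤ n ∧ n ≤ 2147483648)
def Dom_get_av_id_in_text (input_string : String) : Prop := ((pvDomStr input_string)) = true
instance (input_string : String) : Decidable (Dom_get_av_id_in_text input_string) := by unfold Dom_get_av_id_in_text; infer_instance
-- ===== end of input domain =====

-- B replaces find+accumulator with one positional scan returning a slice; alternative decomposition, same cost.

-- ===== PORT A =====
-- the 'for char in …: if isdigit: av_id += char else break' loop, as structural recursion on the slice
def avLoopA (av_id : List Char) : List Char → List Char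
  | [] => av_id
  | c :: rest => if PySem.Chars.isdigit c then avLoopA (av_id ++ [c]) rest else av_id

def get_av_id_in_text (input_string : String) : Option String :=
  let start_index := PySem.Str.find input_string "av"
  if start_index ≠ -1 then
    some (String.ofList (avLoopA ['a','v']
      (PySem.List.slice input_string.toList (some (start_index + 2)) none)))
  else
    none

-- ===== PORT B =====
-- the scan: advance to the first position where the string starts with "av",
-- then the digit-extension while-loop is the takeWhile over the remainder,
-- and the returned slice input_string[i:end] is 'a'::'v'::digits
def scanAvB : List Char → Option (List Char)
  | [] => none
  | c :: rest =>
    if ['a','v'].isPrefixOf (c :: rest) then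
      some ('a' :: 'v' :: ((c :: rest).drop 2).takeWhile PySem.Chars.isdigit)
    else
      scanAvB rest

def get_av_id_in_text_alt (input_string : String) : Option String :=
  (scanAvB input_string.toList).map String.ofList

-- ===== PRECONDITION & SPEC =====
def Spec_get_av_id_in_text (input_string : String) (out : Option String) : Prop := out = get_av_id_in_text_alt input_string
instance (input_string : String) (out : Option String) : Decidable (Spec_get_av_id_in_text input_string out) := by unfold Spec_get_av_id_in_text; infer_instance

-- ===== CLAIM (what is proved, stated in full; the proofs are below) =====
def Claim_equal_get_av_id_in_text : Prop := ∀ (input_string : String), Dom_get_av_id_in_text input_string → Spec_get_av_id_in_text input_string (get_av_id_in_text input_string)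

-- ===== LEMMAS AND PROOFS =====

-- A's loop accumulates exactly the leading digits
theorem avLoopA_eq (l : List Char) : ∀ acc, avLoopA acc l = acc ++ l.takeWhile PySem.Chars.isdigit := by
  induction l with
  | nil => intro acc; simp [avLoopA]
  | cons c rest ih =>
    intro acc
    by_cases h : PySem.Chars.isdigit c
    · simp [avLoopA, h, ih]
    · simp [avLoopA, h]

theorem scanAvB_none (l : List Char) (h : ¬ ['a','v'] <:+: l) : scanAvB l = none := by
  induction l with
  | nil => simp [scanAvB]
  | cons c rest ih =>
    have hpre : ¬ ['a','v'].isPrefixOf (c :: rest) := by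
      intro hp
      exact h ((List.isPrefixOf_iff_prefix.mp hp).isInfix)
    simp only [scanAvB, hpre, if_neg, Bool.false_eq_true, not_false_eq_true]
    exact ih (fun hi => h (hi.trans (List.suffix_cons c rest).isInfix))

theorem scanAvB_some (l : List Char) : ∀ i : Nat, ['a','v'] <+: l.drop i →
    (∀ j < i, ¬ ['a','v'] <+: l.drop j) →
    scanAvB l = some ('a' :: 'v' :: (l.drop (i + 2)).takeWhile PySem.Chars.isdigit) := by
  induction l with
  | nil => intro i hpre _; simp at hpre
  | cons c rest ih =>
    intro i hpre hmin
    cases i with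
    | zero =>
      have hp : ['a','v'].isPrefixOf (c :: rest) := List.isPrefixOf_iff_prefix.mpr (by simpa using hpre)
      simp [scanAvB, hp]
    | succ k =>
      have hnp : ¬ ['a','v'].isPrefixOf (c :: rest) := by
        intro hp
        exact hmin 0 (Nat.succ_pos k) (by simpa using List.isPrefixOf_iff_prefix.mp hp)
      simp only [scanAvB, hnp, if_neg, Bool.false_eq_true, not_false_eq_true]
      have := ih k (by simpa using hpre) (fun j hj => by
        have := hmin (j + 1) (by omega)
        simpa using this)
      simpa using this

theorem ports_agree (s : String) : get_av_id_in_text s = get_av_id_in_text_alt s := by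
  unfold get_av_id_in_text get_av_id_in_text_alt
  by_cases h : PySem.Chars.find s.toList ['a','v'] = -1
  · have hninf : ¬ ['a','v'] <:+: s.toList := (PySem.Chars.find_eq_neg_one_iff s.toList ['a','v']).mp h
    simp [PySem.Str.find_eq, h, scanAvB_none s.toList hninf]
  · have hfind : PySem.Str.find s "av" = PySem.Chars.find s.toList ['a','v'] := by
      simp [PySem.Str.find_eq]
    have hnn : 0 ≤ PySem.Chars.find s.toList ['a','v'] := by
      have := PySem.Chars.neg_one_le_find s.toList ['a','v']
      omega
    obtain ⟨hpre, hmin⟩ := PySem.Chars.find_spec (s := s.toList) (sub := ['a','v']) hnn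
    set i := (PySem.Chars.find s.toList ['a','v']).toNat with hi
    have hieq : PySem.Chars.find s.toList ['a','v'] = (i : Int) := (Int.toNat_of_nonneg hnn).symm
    have hslice : PySem.List.slice s.toList (some (PySem.Chars.find s.toList ['a','v'] + 2)) none
        = s.toList.drop (i + 2) := by
      rw [hieq]
      have : ((i : Int) + 2) = ((i + 2 : Nat) : Int) := by push_cast; ring
      rw [this, PySem.List.slice_from_natCast]
    rw [scanAvB_some s.toList i hpre (fun j hj => hmin j hj)]
    simp [h, hslice, avLoopA_eq]

-- ===== VERDICT (by name: the statement is the Claim_ definition above) =====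
theorem get_av_id_in_text_spec : Claim_equal_get_av_id_in_text := by
  intro s _
  unfold Spec_get_av_id_in_text
  exact ports_agree s
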